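-- pv_equiv track=rewrite | github.com/Super-EvilTeam/ThraxBoT | build_finder.py | list_gen
-- ===== SOURCE A (Python) =====
-- def list_gen(perk_list):
--   new_list = []
--   for i in perk_list:
--     if perk_list.count(i) ==2:
--       if f"+6 {i}" not in new_list:
--         new_list.append(f"+6 {i}")
--     elif perk_list.count(i) == 1:
--       if f"+3 {i}" not in new_list:
--         new_list.append(f"+3 {i}")
--   return new_list
-- ===== SOURCE B (Python) =====
-- def list_gen(perk_list):
--   out = []
--   work = list(perk_list)
--   while work:
--     head = work[0]
--     rest = [x for x in work[1:] if x != head]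
--     extra = len(work) - 1 - len(rest)  # occurrences of head beyond the first
--     if extra == 0:
--       out.append("+3 " + head)
--     elif extra == 1:
--       out.append("+6 " + head)
--     work = rest
--   return out
-- ===== Notes on version B (the rewrite author's own statement) =====
-- stated objective: faster
-- what changed: Replaces A's per-element full-list .count scans and 'not in new_list' dedup by a worklist partition loop: each round labels the first remaining perk by how many occurrences the filter removes, then continues on the shrunken worklist, so each distinct perk is processed exactly once and no output-membership check exists.
import Mathlib
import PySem

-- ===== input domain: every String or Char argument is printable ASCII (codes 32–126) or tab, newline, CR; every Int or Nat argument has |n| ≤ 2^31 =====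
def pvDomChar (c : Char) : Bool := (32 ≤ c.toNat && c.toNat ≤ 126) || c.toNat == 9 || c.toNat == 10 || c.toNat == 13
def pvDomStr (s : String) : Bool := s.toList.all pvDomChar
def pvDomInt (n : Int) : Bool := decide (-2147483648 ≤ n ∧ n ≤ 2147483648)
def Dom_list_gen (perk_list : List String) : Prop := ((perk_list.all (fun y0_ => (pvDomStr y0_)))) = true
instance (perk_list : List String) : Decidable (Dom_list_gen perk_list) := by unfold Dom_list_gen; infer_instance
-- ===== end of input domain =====

-- B replaces A's repeated full-list .count scans and output-membership dedup by a worklist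
-- partition loop: each round labels the first remaining perk by how many occurrences it
-- filters out, then continues on the shrunken worklist, touching each distinct perk once (objective: faster, as measured).

-- ===== PORT A =====
def list_gen (perk_list : List String) : List String :=
  perk_list.foldl (fun new_list i =>
    if perk_list.count i = 2 then
      (if ("+6 " ++ i) ∈ new_list then new_list else new_list ++ ["+6 " ++ i])
    else if perk_list.count i = 1 then
      (if ("+3 " ++ i) ∈ new_list then new_list else new_list ++ ["+3 " ++ i])
    else new_list) []

-- ===== PORT B =====
-- the 'while work:' loop of Source B; the fuel argument (initially the worklist length,
-- which only shrinks) merely makes the recursion structural — it never runs out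
def pvLoopB (fuel : Nat) (out : List String) (work : List String) : List String :=
  match fuel, work with
  | _, [] => out
  | 0, _ => out
  | fuel + 1, head :: t =>
    let rest := t.filter (fun x => x != head)
    let extra : Int := ((head :: t).length : Int) - 1 - (rest.length : Int)
    pvLoopB fuel
      (if extra = 0 then out ++ ["+3 " ++ head]
       else if extra = 1 then out ++ ["+6 " ++ head]
       else out) rest

def list_gen_alt (perk_list : List String) : List String :=
  pvLoopB perk_list.length [] perk_list

-- ===== PRECONDITION & SPEC =====
def Spec_list_gen (perk_list : List String) (out : List String) : Prop := out = list_gen_alt perk_list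
instance (perk_list : List String) (out : List String) : Decidable (Spec_list_gen perk_list out) := by unfold Spec_list_gen; infer_instance

-- ===== CLAIM (what is proved, stated in full; the proofs are below) =====
def Claim_equal_list_gen : Prop := ∀ (perk_list : List String), Dom_list_gen perk_list → Spec_list_gen perk_list (list_gen perk_list)

-- ===== LEMMAS AND PROOFS =====

-- label of a perk: the string it contributes (once), if any
def pvLabel (L : List String) (i : String) : Option String :=
  if L.count i = 2 then some ("+6 " ++ i)
  else if L.count i = 1 then some ("+3 " ++ i) else none

-- distinct elements in first-occurrence order, by head-partitioning (fuel = length bound)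
def pvDedupF (fuel : Nat) (L : List String) : List String :=
  match fuel, L with
  | _, [] => []
  | 0, _ => []
  | fuel + 1, h :: t => h :: pvDedupF fuel (t.filter (fun x => x != h))

def pvDedup (L : List String) : List String := pvDedupF L.length L

theorem pv_filter_le (h : String) (t : List String) :
    (t.filter (fun x => x != h)).length ≤ t.length := List.length_filter_le _ _

theorem pvDedupF_fuel : ∀ (f g : Nat) (L : List String),
    L.length ≤ f → L.length ≤ g → pvDedupF f L = pvDedupF g L := by
  intro f
  induction f with
  | zero =>
    intro g L hf _
    have : L = [] := List.eq_nil_of_length_eq_zero (Nat.le_zero.mp hf)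
    subst this
    cases g <;> rfl
  | succ f ih =>
    intro g L hf hg
    cases L with
    | nil => cases g <;> rfl
    | cons h t =>
      cases g with
      | zero => simp at hg
      | succ g =>
        simp only [pvDedupF]
        have hr := pv_filter_le h t
        simp only [List.length_cons] at hf hg
        rw [ih g (t.filter (fun x => x != h)) (by omega) (by omega)]

theorem pvDedup_nil : pvDedup [] = [] := rfl

theorem pvDedup_cons (h : String) (t : List String) :
    pvDedup (h :: t) = h :: pvDedup (t.filter (fun x => x != h)) := by
  unfold pvDedup
  simp only [List.length_cons, pvDedupF]
  rw [pvDedupF_fuel t.length (t.filter (fun x => x != h)).length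
        (t.filter (fun x => x != h)) (pv_filter_le h t) le_rfl]

def pvStepA (L : List String) (new_list : List String) (i : String) : List String :=
  if L.count i = 2 then
    (if ("+6 " ++ i) ∈ new_list then new_list else new_list ++ ["+6 " ++ i])
  else if L.count i = 1 then
    (if ("+3 " ++ i) ∈ new_list then new_list else new_list ++ ["+3 " ++ i])
  else new_list

theorem pv_app_inj (p : String) {i j : String} (h : p ++ i = p ++ j) : i = j := by
  have := congrArg String.toList h
  simp [String.toList_append] at this
  exact String.toList_injective this

theorem pv_six_ne_three (i j : String) : "+6 " ++ i ≠ "+3 " ++ j := by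
  intro h
  have := congrArg String.toList h
  simp [String.toList_append] at this

theorem pv_mem_six (L : List String) (s : List String) (i : String) (h2 : L.count i = 2) :
    (("+6 " ++ i) ∈ s.filterMap (pvLabel L)) ↔ i ∈ s := by
  simp only [List.mem_filterMap]
  constructor
  · rintro ⟨j, hj, hlab⟩
    unfold pvLabel at hlab
    split_ifs at hlab with hc2 hc1
    · rw [← pv_app_inj "+6 " (Option.some.inj hlab)]; exact hj
    · exact absurd (Option.some.inj hlab).symm (pv_six_ne_three i j)
  · intro hi
    exact ⟨i, hi, by simp [pvLabel, h2]⟩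

theorem pv_mem_three (L : List String) (s : List String) (i : String) (h1 : L.count i = 1) :
    (("+3 " ++ i) ∈ s.filterMap (pvLabel L)) ↔ i ∈ s := by
  simp only [List.mem_filterMap]
  constructor
  · rintro ⟨j, hj, hlab⟩
    unfold pvLabel at hlab
    split_ifs at hlab with hc2 hc1
    · exact absurd (Option.some.inj hlab) (pv_six_ne_three j i)
    · rw [← pv_app_inj "+3 " (Option.some.inj hlab)]; exact hj
  · intro hi
    exact ⟨i, hi, by simp [pvLabel, h1]⟩

theorem pv_stepA_eq (L : List String) (s : PySem.Set String) (i : String) :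
    pvStepA L (s.filterMap (pvLabel L)) i = (PySem.Set.add s i).filterMap (pvLabel L) := by
  have hadd : PySem.Set.add s i = if i ∈ s then s else s ++ [i] := by
    simp [PySem.Set.add, PySem.Set.contains]
  unfold pvStepA
  by_cases h2 : L.count i = 2
  · rw [if_pos h2, hadd]
    by_cases hi : i ∈ s
    · rw [if_pos ((pv_mem_six L s i h2).mpr hi), if_pos hi]
    · rw [if_neg (fun h => hi ((pv_mem_six L s i h2).mp h)), if_neg hi,
        List.filterMap_append]
      simp [pvLabel, h2]
  · rw [if_neg h2, hadd]
    by_cases h1 : L.count i = 1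
    · rw [if_pos h1]
      by_cases hi : i ∈ s
      · rw [if_pos ((pv_mem_three L s i h1).mpr hi), if_pos hi]
      · rw [if_neg (fun h => hi ((pv_mem_three L s i h1).mp h)), if_neg hi,
          List.filterMap_append]
        simp [pvLabel, h1]
    · rw [if_neg h1]
      by_cases hi : i ∈ s
      · rw [if_pos hi]
      · rw [if_neg hi, List.filterMap_append]
        simp [pvLabel, h2, h1]

theorem pvA_inv (L : List String) (rest : List String) : ∀ (s : PySem.Set String),
    rest.foldl (pvStepA L) (s.filterMap (pvLabel L))
      = (rest.foldl PySem.Set.add s).filterMap (pvLabel L) := by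
  induction rest with
  | nil => intro s; rfl
  | cons x xs ih =>
    intro s
    simp only [List.foldl_cons, pv_stepA_eq L s x]
    exact ih (PySem.Set.add s x)

-- PySem.Set.ofList (first-occurrence dedup via foldl add) equals head-partition dedup
theorem pv_foldl_add_eq (L : List String) : ∀ (s : List String),
    L.foldl PySem.Set.add s = s ++ pvDedup (L.filter (fun x => decide (x ∉ s))) := by
  induction L with
  | nil => intro s; simp [pvDedup, pvDedupF]
  | cons h t ih =>
    intro s
    have hadd : PySem.Set.add s h = if h ∈ s then s else s ++ [h] := by
      simp [PySem.Set.add, PySem.Set.contains]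
    simp only [List.foldl_cons, hadd]
    by_cases hs : h ∈ s
    · rw [if_pos hs, ih s, List.filter_cons, if_neg (by simp [hs])]
    · rw [if_neg hs, ih (s ++ [h]), List.filter_cons, if_pos (by simp [hs])]
      have hfil : t.filter (fun x => decide (x ∉ s ++ [h]))
          = (t.filter (fun x => decide (x ∉ s))).filter (fun x => x != h) := by
        rw [List.filter_filter]
        apply List.filter_congr
        intro x _
        by_cases hxh : x = h
        · simp [hxh]
        · simp [List.mem_append, hxh]
      rw [hfil, pvDedup_cons]
      simp

theorem pvA_eq (L : List String) : list_gen L = (pvDedup L).filterMap (pvLabel L) := by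
  have h := pvA_inv L L []
  have h2 := pv_foldl_add_eq L []
  have hfil : L.filter (fun x => decide (x ∉ ([] : List String))) = L := by
    apply List.filter_eq_self.mpr; intro a _; simp
  rw [hfil, List.nil_append] at h2
  simpa [list_gen, pvStepA, h2] using h

-- counts of surviving elements are unchanged by filtering out the head
theorem pv_count_filter (h : String) (t : List String) (k : String) (hk : k ≠ h) :
    (t.filter (fun x => x != h)).count k = t.count k :=
  List.count_filter (by simp [hk])

theorem pv_filter_len (h : String) (t : List String) :
    (t.filter (fun x => x != h)).length + t.count h = t.length := by
  induction t with
  | nil => simp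
  | cons a t ih =>
    simp only [List.filter_cons, List.count_cons, List.length_cons]
    by_cases hah : a = h
    · subst hah
      rw [if_neg (by simp), if_pos (by simp)]
      omega
    · rw [if_pos (by simp [hah]), if_neg (by simpa using hah)]
      simp only [List.length_cons]
      omega

theorem pv_mem_pvDedupF : ∀ (f : Nat) (L : List String), ∀ x ∈ pvDedupF f L, x ∈ L := by
  intro f
  induction f with
  | zero =>
    intro L x hx
    cases L with
    | nil => simp [pvDedupF] at hx
    | cons h t => simp [pvDedupF] at hx
  | succ f ih =>
    intro L x hx
    cases L with
    | nil => simp [pvDedupF] at hx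
    | cons h t =>
      simp only [pvDedupF, List.mem_cons] at hx
      rcases hx with hx | hx
      · simp [hx]
      · have := ih _ x hx
        have := List.mem_of_mem_filter this
        simp [this]

theorem pv_mem_pvDedup (L : List String) : ∀ x ∈ pvDedup L, x ∈ L :=
  pv_mem_pvDedupF L.length L

theorem pvLoopB_eq : ∀ (f : Nat) (work out : List String), work.length ≤ f →
    pvLoopB f out work = out ++ (pvDedup work).filterMap (pvLabel work) := by
  intro f
  induction f with
  | zero =>
    intro work out hf
    have : work = [] := List.eq_nil_of_length_eq_zero (Nat.le_zero.mp hf)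
    subst this
    simp [pvLoopB, pvDedup_nil]
  | succ f ih =>
    intro work out hf
    cases work with
    | nil => simp [pvLoopB, pvDedup_nil]
    | cons h t =>
    have hlen := pv_filter_len h t
    simp only [List.length_cons] at hf
    simp only [pvLoopB]
    rw [ih _ _ (by have := pv_filter_le h t; omega)]
    have hextra : (((h :: t).length : Int) - 1 - ((t.filter (fun x => x != h)).length : Int))
        = (t.count h : Int) := by
      simp only [List.length_cons]
      omega
    rw [hextra]
    -- the recursive filterMap may use counts in the full list: they agree on survivors
    have hcong : (pvDedup (t.filter (fun x => x != h))).filterMap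
          (pvLabel (t.filter (fun x => x != h)))
        = (pvDedup (t.filter (fun x => x != h))).filterMap (pvLabel (h :: t)) := by
      apply List.filterMap_congr
      intro x hx
      have hxt : x ∈ t.filter (fun x => x != h) := pv_mem_pvDedup _ x hx
      have hxh : x ≠ h := by
        have := List.of_mem_filter hxt
        simpa using this
      have hc : (t.filter (fun x => x != h)).count x = (h :: t).count x := by
        rw [pv_count_filter h t x hxh]
        simp [Ne.symm hxh]
      unfold pvLabel
      rw [hc]
    rw [hcong]
    rw [pvDedup_cons, List.filterMap_cons]
    have hcount : (h :: t).count h = t.count h + 1 := by simp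
    by_cases h0 : t.count h = 0
    · have hl : pvLabel (h :: t) h = some ("+3 " ++ h) := by
        simp [pvLabel, hcount, h0]
      rw [hl, if_pos (by simp [h0])]
      simp
    · by_cases h1 : t.count h = 1
      · have hl : pvLabel (h :: t) h = some ("+6 " ++ h) := by
          simp [pvLabel, hcount, h1]
        rw [hl, if_neg (by omega), if_pos (by simp [h1])]
        simp
      · have hl : pvLabel (h :: t) h = none := by
          unfold pvLabel
          rw [hcount, if_neg (by omega), if_neg (by omega)]
        rw [hl, if_neg (by omega), if_neg (by omega)]

theorem pvB_eq (L : List String) : list_gen_alt L = (pvDedup L).filterMap (pvLabel L) := by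
  unfold list_gen_alt
  simpa using pvLoopB_eq L.length L [] le_rfl

-- ===== VERDICT (by name: the statement is the Claim_ definition above) =====
theorem list_gen_spec : Claim_equal_list_gen := by
  intro L _
  unfold Spec_list_gen
  rw [pvA_eq, pvB_eq]
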